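-- pv_equiv track=rewrite | github.com/rhamenator/ai-scraping-defense | src/shared/graphql_security.py | count_fields
-- ===== SOURCE A (Python) =====
-- def count_fields(query: str) -> int:
--     """Count the number of fields in a GraphQL query."""
--     # Simple field counting
--     field_count = 0
--     in_string = False
--     escape_next = False
--
--     for i, char in enumerate(query):
--         if escape_next:
--             escape_next = False
--             continue
--
--         if char == "\\":
--             escape_next = True
--             continue
--
--         if char == '"':
--             in_string = not in_string
--             continue
--
--         if in_string:
--             continue
--
--         # Count alphanumeric sequences that follow non-alphanumeric chars
--         if char.isalnum() and i > 0 and not query[i - 1].isalnum():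
--             # Skip common keywords
--             if i + 5 < len(query):
--                 word_start = (
--                     query[i: i + 10].split()[0] if query[i:].strip() else ""
--                 )
--                 if word_start.lower() not in [
--                     "query",
--                     "mutation",
--                     "fragment",
--                     "on",
--                     "true",
--                     "false",
--                     "null",
--                 ]:
--                     field_count += 1
--
--     return field_count
-- ===== SOURCE B (Python) =====
-- _KEYWORDS = frozenset(["query", "mutation", "fragment", "on", "true", "false", "null"])
--
--
-- def _active_mask(query):
--     # Stage 1: per-index flag "this index is live": not escaped, not a backslash
--     # or quote character, and not inside a double-quoted string.
--     mask = []
--     in_string = False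
--     escape = False
--     for ch in query:
--         if escape:
--             mask.append(False)
--             escape = False
--         elif ch == "\\":
--             mask.append(False)
--             escape = True
--         elif ch == '"':
--             mask.append(False)
--             in_string = not in_string
--         else:
--             mask.append(not in_string)
--     return mask
--
--
-- def _word_at(query, i):
--     # the word starting at i, read from a window of at most 10 characters
--     end = min(i + 10, len(query))
--     w = []
--     while i < end and not query[i].isspace():
--         w.append(query[i])
--         i += 1
--     return "".join(w)
--
--
-- def count_fields(query: str) -> int:
--     n = len(query)
--     mask = _active_mask(query)
--     # Stage 2: word-start positions in the raw text.
--     starts = [i for i in range(1, n)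
--               if query[i].isalnum() and not query[i - 1].isalnum()]
--     # Stage 3: keep the live ones that are not keywords.
--     return sum(1 for i in starts
--                if mask[i] and i + 5 < n
--                and _word_at(query, i).lower() not in _KEYWORDS)
-- ===== Notes on version B (the rewrite author's own statement) =====
-- stated objective: alternative
-- what changed: B is a staged-passes decomposition: it precomputes a per-index live mask (escape/quote state) in one pass, builds the list of word-start positions from adjacent raw characters, then counts the live non-keyword starts with a bounded 10-char window read — instead of A's single loop with an inline counter and per-start suffix slicing (query[i:], .strip(), .split()).
import Mathlib
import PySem

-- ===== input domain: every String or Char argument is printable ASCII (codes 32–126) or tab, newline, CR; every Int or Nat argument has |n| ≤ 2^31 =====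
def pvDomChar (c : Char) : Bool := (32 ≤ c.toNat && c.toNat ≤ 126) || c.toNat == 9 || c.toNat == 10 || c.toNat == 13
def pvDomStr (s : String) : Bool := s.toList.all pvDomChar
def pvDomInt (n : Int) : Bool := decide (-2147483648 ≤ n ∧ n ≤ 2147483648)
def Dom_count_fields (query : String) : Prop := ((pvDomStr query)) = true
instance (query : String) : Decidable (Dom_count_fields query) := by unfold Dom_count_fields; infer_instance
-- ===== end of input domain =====

-- B replaces A's single counting loop (with inline suffix slice/strip/split per word start)
-- by staged passes: a precomputed per-index live mask, a word-start position list from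
-- adjacent raw characters, and a filtered count with a bounded 10-char window read.

-- ===== PORT A =====
def pvKeywordsA : List (List Char) :=
  ["query".toList, "mutation".toList, "fragment".toList, "on".toList,
   "true".toList, "false".toList, "null".toList]

-- loop body of A's `for i, char in enumerate(query)`
def pvStepA (q : List Char) (st : Int × Bool × Bool) (p : Int × Char) : Int × Bool × Bool :=
  match st, p with
  | (fc, ins, esc), (i, ch) =>
    if esc then (fc, ins, false)
    else if ch = '\\' then (fc, ins, true)
    else if ch = '"' then (fc, !ins, esc)
    else if ins then (fc, ins, esc)
    else if PySem.Chars.isalnum ch && decide ((0:Int) < i)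
            && !PySem.Chars.isalnum (PySem.List.pyGetD q (i - 1) ' ') then
      if decide (i + 5 < (q.length : Int)) then
        -- query[i:i+10].split()[0]: pyGetD 0 (IndexError impossible: query[i] is alnum, so split() is nonempty)
        let word_start :=
          if PySem.Chars.strip (PySem.List.slice q (some i) none) ≠ ([] : List Char) then
            PySem.List.pyGetD (PySem.Chars.split₀ (PySem.List.slice q (some i) (some (i + 10)))) 0 []
          else []
        if PySem.Chars.lower word_start ∉ pvKeywordsA then (fc + 1, ins, esc)
        else (fc, ins, esc)
      else (fc, ins, esc)
    else (fc, ins, esc)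

def count_fields (query : String) : Int :=
  let q := query.toList
  ((PySem.List.enumerate q).foldl (pvStepA q) ((0 : Int), false, false)).1

-- ===== PORT B =====
def pvKeywordSetB : PySem.Set (List Char) :=
  PySem.Set.ofList
    ["query".toList, "mutation".toList, "fragment".toList, "on".toList,
     "true".toList, "false".toList, "null".toList]

-- _active_mask(query): per-index live flag from the escape/quote state machine
def pvMaskGo : List Char → Bool → Bool → List Bool
  | [], _, _ => []
  | c :: rest, ins, esc =>
    if esc then false :: pvMaskGo rest ins false
    else if c = '\\' then false :: pvMaskGo rest ins true
    else if c = '"' then false :: pvMaskGo rest (!ins) esc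
    else (!ins) :: pvMaskGo rest ins esc

-- _word_at(query, i): chars from i, stopping at whitespace, window of at most 10
def pvLeadingWord (q : List Char) (i e : Nat) : List Char :=
  if _h : i < e then
    let c := PySem.List.pyGetD q (i : Int) ' '
    if PySem.Chars.isspace c then [] else c :: pvLeadingWord q (i + 1) e
  else []
termination_by e - i

def count_fields_alt (query : String) : Int :=
  let q := query.toList
  let n := q.length
  let mask := pvMaskGo q false false
  let starts := (PySem.List.pyRange 1 (n : Int) 1).filter
    (fun i => PySem.Chars.isalnum (PySem.List.pyGetD q i ' ')
      && !PySem.Chars.isalnum (PySem.List.pyGetD q (i - 1) ' '))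
  ((starts.filter (fun i =>
      mask.getD i.toNat false
      && decide (i + 5 < (n : Int))
      && !(decide (PySem.Chars.lower
            (pvLeadingWord q i.toNat (min (i.toNat + 10) n)) ∈ pvKeywordSetB)))).length : Int)

-- ===== PRECONDITION & SPEC =====
def Spec_count_fields (query : String) (out : Int) : Prop := out = count_fields_alt query
instance (query : String) (out : Int) : Decidable (Spec_count_fields query out) := by unfold Spec_count_fields; infer_instance

-- ===== CLAIM (what is proved, stated in full; the proofs are below) =====
def Claim_equal_count_fields : Prop := ∀ (query : String), Dom_count_fields query → Spec_count_fields query (count_fields query)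

-- ===== LEMMAS AND PROOFS =====

-- combined filter condition B applies over the position range (proof-only helper)
def pvCondB (q : List Char) (mask : List Bool) (n : Nat) (i : Int) : Bool :=
  (mask.getD i.toNat false
      && decide (i + 5 < (n : Int))
      && !(decide (PySem.Chars.lower
            (pvLeadingWord q i.toNat (min (i.toNat + 10) n)) ∈ pvKeywordSetB)))
  && (PySem.Chars.isalnum (PySem.List.pyGetD q i ' ')
    && !PySem.Chars.isalnum (PySem.List.pyGetD q (i - 1) ' '))

lemma pv_alnum_not_space (c : Char) (h : PySem.Chars.isalnum c = true) :
    PySem.Chars.isspace c = false := by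
  simp [PySem.Chars.isalnum, PySem.Chars.isalpha, PySem.Chars.isdigit,
    PySem.Chars.isupper, PySem.Chars.islower, Char.le_def, UInt32.le_iff_toNat_le,
    Char.toNat_val] at h
  simp only [PySem.Chars.isspace]
  simp only [decide_eq_false_iff_not, Bool.or_eq_false_iff, Bool.and_eq_false_iff, not_le]
  omega

-- head of split₀.go once a first token is already in acc
lemma pv_go_head_acc (t : List Char) : ∀ (cur : List Char) (acc : List (List Char)) (x : List Char),
    (PySem.Chars.split₀.go t cur (acc ++ [x])).headD [] = x := by
  induction t with
  | nil =>
    intro cur acc x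
    simp [PySem.Chars.split₀.go]
    split_ifs <;> simp
  | cons c rest ih =>
    intro cur acc x
    simp only [PySem.Chars.split₀.go]
    split_ifs with h1 h2
    · exact ih [] acc x
    · have : cur.reverse :: (acc ++ [x]) = (cur.reverse :: acc) ++ [x] := by simp
      rw [this]; exact ih [] _ x
    · exact ih (c :: cur) acc x

-- head of split₀.go while the first token is still being accumulated
lemma pv_go_first (t : List Char) : ∀ (cur : List Char), cur ≠ [] →
    (PySem.Chars.split₀.go t cur []).headD []
      = cur.reverse ++ t.takeWhile (fun c => !PySem.Chars.isspace c) := by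
  induction t with
  | nil => intro cur h; simp [PySem.Chars.split₀.go, h]
  | cons c rest ih =>
    intro cur h
    simp only [PySem.Chars.split₀.go]
    split_ifs with h1 h2
    · simp [List.isEmpty_iff] at h2; exact absurd h2 h
    · have := pv_go_head_acc rest [] [] cur.reverse
      simp at this
      simp [this, h1]
    · rw [ih (c :: cur) (by simp)]
      simp [h1]

lemma pv_split₀_head (c : Char) (t : List Char) (h : PySem.Chars.isspace c = false) :
    (PySem.Chars.split₀ (c :: t)).headD [] = c :: t.takeWhile (fun x => !PySem.Chars.isspace x) := by
  unfold PySem.Chars.split₀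
  rw [show PySem.Chars.split₀.go (c :: t) [] [] = PySem.Chars.split₀.go t [c] [] by
    simp [PySem.Chars.split₀.go, h]]
  rw [pv_go_first t [c] (by simp)]
  simp

lemma pv_strip_cons_ne_nil (c : Char) (t : List Char) (h : PySem.Chars.isspace c = false) :
    PySem.Chars.strip (c :: t) ≠ [] := by
  simp [PySem.Chars.strip, PySem.Chars.lstrip, PySem.Chars.rstrip, h]
  exact ⟨c, Or.inr rfl, h⟩

lemma pv_leadingWord_eq (q : List Char) : ∀ (m i e : Nat), e - i ≤ m → e ≤ q.length →
    pvLeadingWord q i e = ((q.drop i).take (e - i)).takeWhile (fun c => !PySem.Chars.isspace c) := by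
  intro m
  induction m with
  | zero =>
    intro i e h he
    rw [pvLeadingWord]
    have : ¬ i < e := by omega
    simp [this, show e - i = 0 by omega]
  | succ m ih =>
    intro i e h he
    rw [pvLeadingWord]
    by_cases hlt : i < e
    · have hi : i < q.length := by omega
      simp only [hlt, dif_pos]
      rw [PySem.List.pyGetD_natCast, List.getD_eq_getElem q ' ' hi]
      have hdrop : q.drop i = q[i] :: q.drop (i + 1) := List.drop_eq_getElem_cons hi
      have htake : (q.drop i).take (e - i) = q[i] :: ((q.drop (i+1)).take (e - (i+1))) := by
        rw [hdrop, show e - i = (e - (i+1)) + 1 by omega, List.take_succ_cons]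
      rw [htake, List.takeWhile_cons]
      by_cases hsp : PySem.Chars.isspace q[i] = true
      · simp [hsp]
      · simp only [hsp, if_neg, Bool.not_eq_true] at *
        simp [ih (i+1) e (by omega) he]
    · have : ¬ i < e := hlt
      simp [this, show e - i = 0 by omega]

lemma pv_mem_kw (w : List Char) : (w ∈ pvKeywordSetB) ↔ w ∈ pvKeywordsA := by
  simp [pvKeywordSetB, pvKeywordsA, PySem.Set.ofList]

-- the word A extracts via slice/strip/split equals the word B's bounded window read extracts
lemma pv_word_eq (q : List Char) (k : Nat) (hk : k < q.length)
    (hal : PySem.Chars.isalnum q[k] = true) :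
    (if PySem.Chars.strip (PySem.List.slice q (some (k : Int)) none) ≠ ([] : List Char) then
       PySem.List.pyGetD (PySem.Chars.split₀ (PySem.List.slice q (some (k : Int)) (some ((k : Int) + 10)))) 0 []
     else [])
    = pvLeadingWord q ((k : Int)).toNat (min (((k : Int)).toNat + 10) q.length) := by
  have hsp : PySem.Chars.isspace q[k] = false := pv_alnum_not_space _ hal
  have hdrop : q.drop k = q[k] :: q.drop (k + 1) := List.drop_eq_getElem_cons hk
  rw [PySem.List.slice_from_natCast]
  rw [if_pos (by rw [hdrop]; exact pv_strip_cons_ne_nil _ _ hsp)]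
  rw [show ((k : Int) + 10) = ((k + 10 : Nat) : Int) by push_cast; ring,
    PySem.List.slice_natCast, show k + 10 - k = 10 by omega]
  have htake : (q.drop k).take 10 = q[k] :: ((q.drop (k + 1)).take 9) := by
    rw [hdrop]; rfl
  rw [htake]
  rw [show (0 : Int) = ((0 : Nat) : Int) from rfl, PySem.List.pyGetD_natCast]
  have hne : PySem.Chars.split₀ (q[k] :: (q.drop (k + 1)).take 9) ≠ [] := by
    intro hcon
    have := pv_split₀_head q[k] ((q.drop (k + 1)).take 9) hsp
    rw [hcon] at this
    simp at this
  obtain ⟨w, ws, hws⟩ := List.exists_cons_of_ne_nil hne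
  have hhead := pv_split₀_head q[k] ((q.drop (k + 1)).take 9) hsp
  rw [hws] at hhead ⊢
  simp only [List.headD_cons] at hhead
  simp only [List.getD_cons_zero, hhead]
  rw [Int.toNat_natCast,
    pv_leadingWord_eq q q.length k (min (k + 10) q.length) (by omega) (by omega)]
  have : (q.drop k).take (min (k + 10) q.length - k) = (q.drop k).take 10 := by
    apply List.take_eq_take_iff.mpr
    simp [List.length_drop]
    omega
  rw [this, htake, List.takeWhile_cons, hsp]
  simp

lemma pv_mask_length : ∀ (q : List Char) (ins esc : Bool), (pvMaskGo q ins esc).length = q.length := by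
  intro q
  induction q with
  | nil => intro ins esc; rfl
  | cons c rest ih =>
    intro ins esc
    simp only [pvMaskGo]
    split_ifs <;> simp [ih]

-- one step of A's loop: from a live position the count increments exactly when pvCondB
-- holds there, and the mask-suffix invariant is carried one position forward
lemma pv_step (q : List Char) (k : Nat) (hk : k < q.length) (hk1 : 1 ≤ k)
    (fc : Int) (ins esc : Bool)
    (hmask : pvMaskGo (q.drop k) ins esc = (pvMaskGo q false false).drop k) :
    (pvStepA q (fc, ins, esc) ((k : Int), PySem.List.pyGetD q (k : Int) ' ')).1
        = fc + (if pvCondB q (pvMaskGo q false false) q.length (k : Int) then 1 else 0)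
    ∧ pvMaskGo (q.drop (k + 1))
        (pvStepA q (fc, ins, esc) ((k : Int), PySem.List.pyGetD q (k : Int) ' ')).2.1
        (pvStepA q (fc, ins, esc) ((k : Int), PySem.List.pyGetD q (k : Int) ' ')).2.2
      = (pvMaskGo q false false).drop (k + 1) := by
  have hml : (pvMaskGo q false false).length = q.length := pv_mask_length q false false
  have hkm : k < (pvMaskGo q false false).length := by omega
  have hk0 : 0 < k := hk1
  have hget : PySem.List.pyGetD q (k : Int) ' ' = q[k] := by
    rw [PySem.List.pyGetD_natCast, List.getD_eq_getElem q ' ' hk]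
  have hgd : (pvMaskGo q false false).getD ((k : Int)).toNat false
      = (pvMaskGo q false false)[k] := by
    rw [Int.toNat_natCast, List.getD_eq_getElem _ false hkm]
  have hdropq : q.drop k = q[k] :: q.drop (k + 1) := List.drop_eq_getElem_cons hk
  have hdropm : (pvMaskGo q false false).drop k
      = (pvMaskGo q false false)[k] :: (pvMaskGo q false false).drop (k + 1) :=
    List.drop_eq_getElem_cons hkm
  rw [hdropq, hdropm] at hmask
  unfold pvStepA pvCondB
  dsimp only
  rw [hget, hgd]
  by_cases hesc : esc = true
  · subst hesc
    simp only [pvMaskGo, if_true, List.cons.injEq] at hmask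
    obtain ⟨hbit, htail⟩ := hmask
    rw [← hbit]
    simp [htail]
  · simp only [Bool.not_eq_true] at hesc
    subst hesc
    by_cases hbs : q[k] = '\\'
    · simp only [pvMaskGo, hbs, Bool.false_eq_true, if_false, if_true,
        List.cons.injEq] at hmask
      obtain ⟨hbit, htail⟩ := hmask
      rw [← hbit]
      simp [hbs, htail]
    · by_cases hq : q[k] = '"'
      · simp only [pvMaskGo, hq, show ¬('"' = '\\') from by decide, Bool.false_eq_true,
          if_false, if_true, List.cons.injEq] at hmask
        obtain ⟨hbit, htail⟩ := hmask
        rw [← hbit]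
        simp [hq, htail]
      · simp only [pvMaskGo, hbs, hq, Bool.false_eq_true, if_false,
          List.cons.injEq] at hmask
        obtain ⟨hbit, htail⟩ := hmask
        rw [← hbit]
        by_cases hins : ins = true
        · subst hins
          simp [hbs, hq, htail]
        · simp only [Bool.not_eq_true] at hins
          subst hins
          by_cases hal : PySem.Chars.isalnum q[k] = true
          · by_cases hpv :
                PySem.Chars.isalnum (PySem.List.pyGetD q ((k : Int) - 1) ' ') = true
            · simp [hbs, hq, hal, hpv, htail]
            · simp only [Bool.not_eq_true] at hpv
              by_cases h5 : ((k : Int) + 5 < (q.length : Int))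
              · have hword := pv_word_eq q k hk hal
                simp only [Int.toNat_natCast] at hword
                simp at hword
                by_cases hmem : PySem.Chars.lower
                    (pvLeadingWord q k (min (k + 10) q.length)) ∈ pvKeywordsA
                · simp [hbs, hq, hal, hpv, h5, hk0, hword, hmem, pv_mem_kw, htail]
                · simp [hbs, hq, hal, hpv, h5, hk0, hword, hmem, pv_mem_kw, htail]
              · simp [hbs, hq, hal, hpv, h5, htail]
          · simp [hbs, hq, hal, htail]

-- the remainder of A's loop from position k ≥ 1 adds exactly the number of positions in
-- [k, n) satisfying pvCondB, given the mask-suffix invariant at k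
lemma pv_main (q : List Char) : ∀ (m k : Nat), q.length - k ≤ m → 1 ≤ k →
    ∀ (fc : Int) (ins esc : Bool),
    pvMaskGo (q.drop k) ins esc = (pvMaskGo q false false).drop k →
    ((PySem.List.pyRange (k : Int) (q.length : Int) 1).foldl
        (fun st j => pvStepA q st (j, PySem.List.pyGetD q j ' ')) (fc, ins, esc)).1
      = fc + (((PySem.List.pyRange (k : Int) (q.length : Int) 1).filter
          (pvCondB q (pvMaskGo q false false) q.length)).length : Int) := by
  intro m
  induction m with
  | zero =>
    intro k hm hk1 fc ins esc _
    rw [PySem.List.pyRange_one_eq_nil (by exact_mod_cast Int.ofNat_le.mpr (by omega))]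
    simp
  | succ m ih =>
    intro k hm hk1 fc ins esc hmask
    by_cases hk : k < q.length
    · rw [PySem.List.pyRange_one_cons (by exact_mod_cast hk)]
      simp only [List.foldl_cons, List.filter_cons]
      obtain ⟨h1, h2⟩ := pv_step q k hk hk1 fc ins esc hmask
      rw [show ((k : Int) + 1) = ((k + 1 : Nat) : Int) by push_cast; ring] at *
      have hrec := ih (k + 1) (by omega) (by omega)
        (pvStepA q (fc, ins, esc) ((k : Int), PySem.List.pyGetD q (k : Int) ' ')).1
        (pvStepA q (fc, ins, esc) ((k : Int), PySem.List.pyGetD q (k : Int) ' ')).2.1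
        (pvStepA q (fc, ins, esc) ((k : Int), PySem.List.pyGetD q (k : Int) ' ')).2.2
        h2
      by_cases hc : pvCondB q (pvMaskGo q false false) q.length (k : Int) = true
      · rw [if_pos hc] at h1
        simp only [hc, if_pos]
        rw [hrec, h1]
        simp only [List.length_cons]
        push_cast
        ring
      · simp only [Bool.not_eq_true] at hc
        simp only [hc, Bool.false_eq_true, if_false, add_zero] at h1 ⊢
        rw [hrec, h1]
    · rw [PySem.List.pyRange_one_eq_nil (by exact_mod_cast Int.ofNat_le.mpr (by omega))]
      simp

-- A's step at index 0 never counts and establishes the mask-suffix invariant at 1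
lemma pv_base (q : List Char) (h : 0 < q.length) :
    (pvStepA q ((0 : Int), false, false) ((0 : Int), PySem.List.pyGetD q 0 ' ')).1 = 0
    ∧ pvMaskGo (q.drop 1)
        (pvStepA q ((0 : Int), false, false) ((0 : Int), PySem.List.pyGetD q 0 ' ')).2.1
        (pvStepA q ((0 : Int), false, false) ((0 : Int), PySem.List.pyGetD q 0 ' ')).2.2
      = (pvMaskGo q false false).drop 1 := by
  have hget : PySem.List.pyGetD q (0 : Int) ' ' = q[0] := by
    rw [show (0 : Int) = ((0 : Nat) : Int) from rfl, PySem.List.pyGetD_natCast,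
      List.getD_eq_getElem q ' ' h]
  have hdropq : q = q[0] :: q.drop 1 := by
    have := List.drop_eq_getElem_cons h
    simpa using this
  have hmg : pvMaskGo q false false = pvMaskGo (q[0] :: q.drop 1) false false := by
    rw [← hdropq]
  unfold pvStepA
  dsimp only
  rw [hget, hmg]
  by_cases hbs : q[0] = '\\'
  · simp [pvMaskGo, hbs]
  · by_cases hq : q[0] = '"'
    · simp [pvMaskGo, hq]
    · simp [pvMaskGo, hbs, hq]

-- B's two filter stages combine into the single condition pvCondB
lemma pv_alt_eq (query : String) :
    count_fields_alt query
      = (((PySem.List.pyRange 1 (query.toList.length : Int) 1).filter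
          (pvCondB query.toList (pvMaskGo query.toList false false)
            query.toList.length)).length : Int) := by
  unfold count_fields_alt
  dsimp only
  rw [List.filter_filter]
  rfl

-- ===== VERDICT (by name: the statement is the Claim_ definition above) =====
theorem count_fields_spec : Claim_equal_count_fields := by
  intro query _
  unfold Spec_count_fields count_fields
  dsimp only
  rw [PySem.List.enumerate_eq_map_pyRange query.toList ' ', List.foldl_map]
  simp only [PySem.List.len]
  rw [pv_alt_eq query]
  by_cases h0 : 0 < query.toList.length
  · rw [show (0 : Int) = ((0 : Nat) : Int) from rfl,
      PySem.List.pyRange_one_cons (by exact_mod_cast h0)]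
    simp only [List.foldl_cons]
    obtain ⟨h1, h2⟩ := pv_base query.toList h0
    have hmain := pv_main query.toList query.toList.length 1 (by omega) (by omega)
      (pvStepA query.toList ((0 : Int), false, false)
        ((0 : Int), PySem.List.pyGetD query.toList 0 ' ')).1
      (pvStepA query.toList ((0 : Int), false, false)
        ((0 : Int), PySem.List.pyGetD query.toList 0 ' ')).2.1
      (pvStepA query.toList ((0 : Int), false, false)
        ((0 : Int), PySem.List.pyGetD query.toList 0 ' ')).2.2
      h2
    simp only [Nat.cast_zero, Nat.cast_one, zero_add] at hmain ⊢
    rw [hmain, h1]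
    simp
  · have hlen : query.toList.length = 0 := by omega
    rw [hlen]
    rw [PySem.List.pyRange_one_eq_nil (by norm_num),
      PySem.List.pyRange_one_eq_nil (by norm_num)]
    simp
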